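-- pv_equiv track=rewrite | github.com/dolr-ai/content-moderation | notebooks/002-data_relabel.py | map_to_primary_category
-- ===== SOURCE A (Python) =====
-- def map_to_primary_category(joint_label: str) -> str:
--     """
--     Maps the joint labels to primary moderation categories.
--     Takes a joint_label string (hyphenated or single) and returns primary category.
--
--     Args:
--         joint_label: String containing one or more labels separated by hyphens
--
--     Returns:
--         str: Primary category name
--     """
--     # Convert to set of labels for easier checking
--     labels = set(joint_label.split("-"))
--
--     # Priority order of checks
--     if "identity_hate" in labels:
--         return "hate_discrimination"
--     elif "threat" in labels:
--         return "violence_threats"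
--     elif any(
--         label in labels for label in ["toxic", "obscene", "insult", "severe_toxic"]
--     ):
--         return "offensive_language"
--     else:
--         return "clean"
-- ===== SOURCE B (Python) =====
-- def map_to_primary_category(joint_label: str) -> str:
--     """
--     Maps the joint labels to primary moderation categories.
--     Scans the hyphen-separated tokens once, keeping the highest-priority
--     (lowest-rank) category seen; returns 'clean' if no token is a known label.
--     """
--     rank_of = {
--         "identity_hate": (0, "hate_discrimination"),
--         "threat": (1, "violence_threats"),
--         "toxic": (2, "offensive_language"),
--         "obscene": (2, "offensive_language"),
--         "insult": (2, "offensive_language"),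
--         "severe_toxic": (2, "offensive_language"),
--     }
--     best = (3, "clean")
--     for token in joint_label.split("-"):
--         hit = rank_of.get(token)
--         if hit is not None and hit[0] < best[0]:
--             best = hit
--     return best[1]
-- ===== Notes on version B (the rewrite author's own statement) =====
-- stated objective: alternative
-- what changed: Replaces A's set construction plus category-ordered membership chain by a single pass over the input tokens that tracks the minimum priority rank via a label->(rank,category) table.
import Mathlib
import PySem

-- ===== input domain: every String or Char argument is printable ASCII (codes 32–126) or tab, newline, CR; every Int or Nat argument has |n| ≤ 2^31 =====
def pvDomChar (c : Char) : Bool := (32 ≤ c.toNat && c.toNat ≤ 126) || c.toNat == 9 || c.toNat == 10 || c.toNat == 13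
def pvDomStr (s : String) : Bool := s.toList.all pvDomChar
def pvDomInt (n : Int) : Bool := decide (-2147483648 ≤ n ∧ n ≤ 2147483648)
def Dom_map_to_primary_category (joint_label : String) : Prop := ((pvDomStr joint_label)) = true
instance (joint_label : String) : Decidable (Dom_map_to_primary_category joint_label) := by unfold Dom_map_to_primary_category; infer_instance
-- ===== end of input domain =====

-- B replaces A's set + category-ordered membership chain by one pass over the tokens
-- tracking the minimum priority rank (objective: alternative decomposition, same cost).

-- ===== PORT A =====
-- split? is exact here: the separator is the nonempty literal "-", so split? never returns none.
def map_to_primary_category (joint_label : String) : String :=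
  let labels : PySem.Set String := PySem.Set.ofList ((PySem.Str.split? joint_label "-").getD [])
  if PySem.Set.contains labels "identity_hate" then "hate_discrimination"
  else if PySem.Set.contains labels "threat" then "violence_threats"
  else if (["toxic", "obscene", "insult", "severe_toxic"].any
            (fun label => PySem.Set.contains labels label)) then "offensive_language"
  else "clean"

-- ===== PORT B =====
def pvRankOf : PySem.Dict String (Int × String) :=
  PySem.Dict.ofList
  [("identity_hate", (0, "hate_discrimination")),
   ("threat", (1, "violence_threats")),
   ("toxic", (2, "offensive_language")),
   ("obscene", (2, "offensive_language")),
   ("insult", (2, "offensive_language")),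
   ("severe_toxic", (2, "offensive_language"))]

def pvStep (best : Int × String) (token : String) : Int × String :=
  match PySem.Dict.get? pvRankOf token with
  | some hit => if hit.1 < best.1 then hit else best
  | none => best

def map_to_primary_category_alt (joint_label : String) : String :=
  (((PySem.Str.split? joint_label "-").getD []).foldl pvStep (3, "clean")).2

-- ===== PRECONDITION & SPEC =====
def Spec_map_to_primary_category (joint_label : String) (out : String) : Prop := out = map_to_primary_category_alt joint_label
instance (joint_label : String) (out : String) : Decidable (Spec_map_to_primary_category joint_label out) := by unfold Spec_map_to_primary_category; infer_instance

-- ===== CLAIM (what is proved, stated in full; the proofs are below) =====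
def Claim_equal_map_to_primary_category : Prop := ∀ (joint_label : String), Dom_map_to_primary_category joint_label → Spec_map_to_primary_category joint_label (map_to_primary_category joint_label)

-- ===== LEMMAS AND PROOFS =====

-- B's lookup table at each known key (literal computations).
theorem pvGet_ih : PySem.Dict.get? pvRankOf "identity_hate" = some (0, "hate_discrimination") := rfl
theorem pvGet_th : PySem.Dict.get? pvRankOf "threat" = some (1, "violence_threats") := rfl
theorem pvGet_tx : PySem.Dict.get? pvRankOf "toxic" = some (2, "offensive_language") := rfl
theorem pvGet_ob : PySem.Dict.get? pvRankOf "obscene" = some (2, "offensive_language") := rfl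
theorem pvGet_in : PySem.Dict.get? pvRankOf "insult" = some (2, "offensive_language") := rfl
theorem pvGet_st : PySem.Dict.get? pvRankOf "severe_toxic" = some (2, "offensive_language") := rfl

-- B's lookup table misses exactly the unknown tokens.
theorem pvGet_none (t : String) (h1 : t ≠ "identity_hate") (h2 : t ≠ "threat") (h3 : t ≠ "toxic")
    (h4 : t ≠ "obscene") (h5 : t ≠ "insult") (h6 : t ≠ "severe_toxic") :
    PySem.Dict.get? pvRankOf t = none := by
  have hit : pvRankOf.items = [("identity_hate", (0, "hate_discrimination")),
      ("threat", (1, "violence_threats")), ("toxic", (2, "offensive_language")),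
      ("obscene", (2, "offensive_language")), ("insult", (2, "offensive_language")),
      ("severe_toxic", (2, "offensive_language"))] := rfl
  rw [PySem.Dict.get?, hit]
  simp only [List.find?]
  rw [beq_eq_false_iff_ne.mpr (Ne.symm h1), beq_eq_false_iff_ne.mpr (Ne.symm h2),
      beq_eq_false_iff_ne.mpr (Ne.symm h3), beq_eq_false_iff_ne.mpr (Ne.symm h4),
      beq_eq_false_iff_ne.mpr (Ne.symm h5), beq_eq_false_iff_ne.mpr (Ne.symm h6)]
  rfl

-- Invariant of B's fold: with the accumulator one of the four canonical (rank, category)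
-- pairs, the fold's category is decided by the highest-priority label present among the
-- remaining tokens, cut off at the accumulator's rank.
theorem pvFold_inv (ts : List String) (b : Int × String)
    (hb : b = (0, "hate_discrimination") ∨ b = (1, "violence_threats") ∨
          b = (2, "offensive_language") ∨ b = (3, "clean")) :
    (ts.foldl pvStep b).2 =
      if b.1 ≤ 0 then b.2
      else if "identity_hate" ∈ ts then "hate_discrimination"
      else if b.1 ≤ 1 then b.2
      else if "threat" ∈ ts then "violence_threats"
      else if b.1 ≤ 2 then b.2
      else if ("toxic" ∈ ts ∨ "obscene" ∈ ts ∨ "insult" ∈ ts ∨ "severe_toxic" ∈ ts) then "offensive_language"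
      else b.2 := by
  induction ts generalizing b with
  | nil => rcases hb with h | h | h | h <;> subst h <;> simp
  | cons t ts ih =>
    by_cases h1 : t = "identity_hate"
    · subst h1
      rcases hb with h | h | h | h <;> subst h <;>
        simp [List.foldl_cons, pvStep, pvGet_ih, ih _ (Or.inl rfl)]
    · by_cases h2 : t = "threat"
      · subst h2
        rcases hb with h | h | h | h <;> subst h <;>
          simp [List.foldl_cons, pvStep, pvGet_th, Ne.symm h1,
                ih _ (Or.inl rfl), ih _ (Or.inr (Or.inl rfl))]
      · by_cases h3 : t = "toxic" ∨ t = "obscene" ∨ t = "insult" ∨ t = "severe_toxic"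
        · rcases h3 with h | h | h | h <;> subst h <;>
          rcases hb with h | h | h | h <;> subst h <;>
            simp [List.foldl_cons, pvStep, pvGet_tx, pvGet_ob, pvGet_in, pvGet_st,
                  Ne.symm h1, Ne.symm h2,
                  ih _ (Or.inl rfl), ih _ (Or.inr (Or.inl rfl)),
                  ih _ (Or.inr (Or.inr (Or.inl rfl))),
                  ih _ (Or.inr (Or.inr (Or.inr rfl)))]
        · simp only [not_or] at h3
          have hg : PySem.Dict.get? pvRankOf t = none :=
            pvGet_none t h1 h2 h3.1 h3.2.1 h3.2.2.1 h3.2.2.2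
          rcases hb with h | h | h | h <;> subst h <;>
            simp [List.foldl_cons, pvStep, hg, Ne.symm h1, Ne.symm h2,
                  Ne.symm h3.1, Ne.symm h3.2.1, Ne.symm h3.2.2.1, Ne.symm h3.2.2.2,
                  ih _ (Or.inl rfl), ih _ (Or.inr (Or.inl rfl)),
                  ih _ (Or.inr (Or.inr (Or.inl rfl))),
                  ih _ (Or.inr (Or.inr (Or.inr rfl)))]

-- ===== VERDICT (by name: the statement is the Claim_ definition above) =====
theorem map_to_primary_category_spec : Claim_equal_map_to_primary_category := by
  intro joint_label _
  unfold Spec_map_to_primary_category map_to_primary_category map_to_primary_category_alt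
  rw [pvFold_inv _ _ (Or.inr (Or.inr (Or.inr rfl)))]
  simp [PySem.Set.contains, PySem.Set.mem_ofList]
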